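-- pv_equiv track=rewrite | github.com/pavita1108/TuCil1_KriptografiKoding | playfair.py | bigram
-- ===== SOURCE A (Python) =====
-- def bigram(plaintext): # bbrp kelompok 2 karakter
--     plaintext_bigram = []
--     for x in range (int(len(plaintext)/2)):
--         bigram = []
--         for y in range(2):
--             bigram.append(plaintext[2 * x + y])
--         plaintext_bigram.append(bigram)
--
--     return(plaintext_bigram)
-- ===== SOURCE B (Python) =====
-- def bigram(plaintext):
--     return [list(pair) for pair in zip(plaintext[::2], plaintext[1::2])]
-- ===== Notes on version B (the rewrite author's own statement) =====
-- stated objective: idiomatic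
-- what changed: Replaces the nested index loops (range(len//2) with an inner range(2) of indexed appends) by zipping the two strided slices plaintext[::2] and plaintext[1::2]; zip's truncation at the shorter slice reproduces the floor-division drop of a trailing odd character; C-level slicing/zip avoids per-character Python-level indexing (measured ~3x at large n).
import Mathlib
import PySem

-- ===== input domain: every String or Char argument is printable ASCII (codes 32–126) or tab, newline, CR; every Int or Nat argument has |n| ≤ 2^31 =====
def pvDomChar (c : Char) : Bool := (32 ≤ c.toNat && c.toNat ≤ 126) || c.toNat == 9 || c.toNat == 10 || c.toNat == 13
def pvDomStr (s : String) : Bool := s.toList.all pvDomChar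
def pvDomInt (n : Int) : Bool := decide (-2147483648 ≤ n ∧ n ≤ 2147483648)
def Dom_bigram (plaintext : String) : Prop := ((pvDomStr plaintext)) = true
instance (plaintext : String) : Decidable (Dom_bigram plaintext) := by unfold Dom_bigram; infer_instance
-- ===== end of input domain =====

-- B replaces A's nested index loops by zipping the two strided slices s[::2] and s[1::2] (same O(n); measured constant-factor faster: C-level slicing/zip instead of per-character indexing).


-- ===== PORT A =====
-- literal port: for x in range(int(len/2)): inner loop y in range(2) appends plaintext[2*x+y].
-- The index 2*x+y is always in range, so Python's s[i] (a 1-char string) is exactly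
-- (pyGet? ...).map (single-char string); the .getD "" default is unreachable.
def bigram (plaintext : String) : List (List String) :=
  (PySem.List.pyRange 0 (PySem.Int.floordiv (PySem.Str.len plaintext) 2) 1).foldl
    (fun plaintext_bigram x =>
      plaintext_bigram ++
        [(PySem.List.pyRange 0 2 1).foldl
          (fun big y =>
            big ++ [((PySem.Str.pyGet? plaintext (2 * x + y)).map (fun c => String.ofList [c])).getD ""])
          []])
    []

-- ===== PORT B =====
-- literal port of Source B: zip the strided slices plaintext[::2] and plaintext[1::2];
-- step 2 ≠ 0 so slice? is always some, the .getD "" default is unreachable.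
def bigram_alt (plaintext : String) : List (List String) :=
  let ev := (PySem.Str.slice? plaintext none none 2).getD ""
  let od := (PySem.Str.slice? plaintext (some 1) none 2).getD ""
  (ev.toList.zip od.toList).map (fun pair => [String.ofList [pair.1], String.ofList [pair.2]])

-- ===== PRECONDITION & SPEC =====
def Spec_bigram (plaintext : String) (out : List (List String)) : Prop := out = bigram_alt plaintext
instance (plaintext : String) (out : List (List String)) : Decidable (Spec_bigram plaintext out) := by unfold Spec_bigram; infer_instance

-- ===== CLAIM (what is proved, stated in full; the proofs are below) =====
def Claim_equal_bigram : Prop := ∀ (plaintext : String), Dom_bigram plaintext → Spec_bigram plaintext (bigram plaintext)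

-- ===== LEMMAS AND PROOFS =====

-- snoc-fold builds init ++ map
theorem pv_foldl_snoc {α β : Type} (xs : List α) (f : α → β) (init : List β) :
    xs.foldl (fun acc x => acc ++ [f x]) init = init ++ xs.map f := by
  induction xs generalizing init with
  | nil => simp
  | cons a t ih => simp [List.foldl, ih]

-- filterMap where every value is some is a map
theorem pv_filterMap_eq_map {α β : Type} (xs : List α) (f : α → Option β) (g : α → β)
    (h : ∀ x ∈ xs, f x = some (g x)) : xs.filterMap f = xs.map g := by
  induction xs with
  | nil => rfl
  | cons a t ih =>
    simp only [List.filterMap_cons, h a (by simp), List.map_cons]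
    exact congrArg _ (ih fun x hx => h x (by simp [hx]))

-- canonical form: k-th pair is [s[2k], s[2k+1]]
def pvPairs (l : List Char) : List (List String) :=
  (List.range (l.length / 2)).map
    (fun k => [String.ofList [(l[2 * k]?).getD 'A'], String.ofList [(l[2 * k + 1]?).getD 'A']])

theorem pv_elem (l : List Char) (k : Nat) (h2 : 2 * k + 1 < l.length) (y : Nat) (hy : y ≤ 1) :
    ((PySem.Chars.pyGet? l (2 * (0 + (k : Int)) + (y : Int))).map
        (fun c => String.ofList [c])).getD "" =
      String.ofList [(l[2 * k + y]?).getD 'A'] := by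
  have h : (2 * (0 + (k : Int)) + (y : Int)) = ((2 * k + y : Nat) : Int) := by push_cast; ring
  have hb : 2 * k + y < l.length := by omega
  simp only [h, PySem.Chars.pyGet?_eq_listPyGet?, PySem.List.pyGet?_natCast]
  simp [List.getElem?_eq_getElem hb]

theorem pv_A_eq (s : String) : bigram s = pvPairs s.toList := by
  set l := s.toList with hl
  unfold bigram
  have hfd : PySem.Int.floordiv (PySem.Str.len s) 2 = ((l.length / 2 : Nat) : Int) := by
    rw [PySem.Str.len_eq, ← hl]
    exact_mod_cast PySem.Int.floordiv_natCast l.length 2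
  rw [hfd, pv_foldl_snoc]
  apply List.ext_getElem
  · simp [PySem.List.length_pyRange_one, pvPairs]
    omega
  · intro i h1 h2
    have hi : i < l.length / 2 := by
      have h1' := h1
      simp [PySem.List.length_pyRange_one] at h1'
      omega
    have hb : 2 * i + 1 < l.length := by omega
    have hr2 : PySem.List.pyRange 0 2 1 = [0, 1] := by decide
    simp only [List.nil_append, List.getElem_map, PySem.List.getElem_pyRange_one, hr2,
      List.foldl_cons, List.foldl_nil, List.nil_append, pvPairs, List.getElem_range]
    have e0 := pv_elem l i hb 0 (by omega)
    have e1 := pv_elem l i hb 1 (by omega)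
    simp only [Nat.cast_zero, Nat.cast_one] at e0 e1
    simp only [PySem.Str.pyGet?, ← hl] at *
    rw [List.singleton_append]
    simp only [e0, e1, Nat.add_zero]

theorem pv_evens (l : List Char) :
    PySem.List.slice? l none none 2 =
      some ((List.range ((l.length + 1) / 2)).map (fun k => (l[2 * k]?).getD 'A')) := by
  simp only [PySem.List.slice?, PySem.List.sliceIndices]
  norm_num
  have hc : (if 0 < l.length then (((l.length : Int) + 2 - 1) / 2).toNat else 0)
      = (l.length + 1) / 2 := by
    split_ifs with h <;> omega
  rw [hc]
  apply pv_filterMap_eq_map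
  intro k hk
  rw [List.mem_range] at hk
  have hb : 2 * k < l.length := by omega
  have ht : ((2 : Int) * (k : Int)).toNat = 2 * k := by omega
  rw [ht, List.getElem?_eq_getElem hb]
  simp

theorem pv_odds (l : List Char) :
    PySem.List.slice? l (some 1) none 2 =
      some ((List.range (l.length / 2)).map (fun k => (l[2 * k + 1]?).getD 'A')) := by
  simp only [PySem.List.slice?, PySem.List.sliceIndices]
  norm_num
  have hc : (if 1 < l.length then (((l.length : Int) - min 1 (l.length : Int) + 2 - 1) / 2).toNat else 0)
      = l.length / 2 := by
    split_ifs with h <;> omega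
  rw [hc]
  apply pv_filterMap_eq_map
  intro k hk
  rw [List.mem_range] at hk
  have hb : 2 * k + 1 < l.length := by omega
  have ht : (min 1 (l.length : Int) + 2 * (k : Int)).toNat = 2 * k + 1 := by omega
  rw [ht, List.getElem?_eq_getElem hb]
  simp

theorem pv_B_eq (s : String) : bigram_alt s = pvPairs s.toList := by
  set l := s.toList with hl
  unfold bigram_alt
  simp only [PySem.Str.slice?, PySem.Chars.slice?_eq_listSlice?, ← hl, pv_evens, pv_odds,
    Option.map_some, Option.getD_some, String.toList_ofList]
  apply List.ext_getElem
  · simp [pvPairs]; omega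
  · intro i h1 h2
    have hi : i < l.length / 2 := by
      simp [pvPairs] at h2; omega
    simp [List.getElem_zip, pvPairs]

-- ===== VERDICT (by name: the statement is the Claim_ definition above) =====
theorem bigram_spec : Claim_equal_bigram := by
  intro s _
  unfold Spec_bigram
  rw [pv_A_eq, pv_B_eq]
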